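-- pv_equiv track=rewrite | github.com/iangregson/advent-of-code | 2023/13/solution.py | find_vertical_symmetry
-- ===== SOURCE A (Python) =====
-- def find_vertical_symmetry(pattern: list[str]) -> int:
--   width, height = len(pattern[0]), len(pattern)
--   for x in range(width-1):
--     errors = 0
--     for xx in range(width):
--       l,r = x - xx, x + xx + 1
--       if 0 <= l < r < width:
--         for y in range(height):
--           if pattern[y][l] != pattern[y][r]:
--             errors += 1
--
--     # we want the off by 1
--     if errors == 1:
--       return x + 1
--
--   return -1
-- ===== SOURCE B (Python) =====
-- def find_vertical_symmetry(pattern: list[str]) -> int: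
--   # stage 1: build, once, a table giving for every ordered column pair (l, r)
--   # the number of rows on which the two columns disagree
--   width = len(pattern[0])
--   diff = {}
--   for l in range(width):
--     for r in range(l + 1, width):
--       diff[(l, r)] = sum(row[l] != row[r] for row in pattern)
--   # stage 2: axis i is a smudged mirror iff its antidiagonal of the table sums to 1
--   for i in range(1, width):
--     errors = sum(diff[(i - 1 - k, i + k)] for k in range(min(i, width - i)))
--     if errors == 1:
--       return i
--   return -1
-- ===== Notes on version B (the rewrite author's own statement) =====
-- stated objective: alternative
-- what changed: B first builds a pairwise column-difference table (dict keyed by column pair, counting disagreeing rows) in one staged pass, then decides each axis by summing the table's antidiagonal -- the row dimension is gone before any axis is examined -- instead of A's per-axis sweep that rescans the rows for every offset.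
-- outside the precondition, e.g. on find_vertical_symmetry(['aab', 'ab']): A returns 1, B raises IndexError; on find_vertical_symmetry([]): A raises IndexError, B raises IndexError
import Mathlib
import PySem

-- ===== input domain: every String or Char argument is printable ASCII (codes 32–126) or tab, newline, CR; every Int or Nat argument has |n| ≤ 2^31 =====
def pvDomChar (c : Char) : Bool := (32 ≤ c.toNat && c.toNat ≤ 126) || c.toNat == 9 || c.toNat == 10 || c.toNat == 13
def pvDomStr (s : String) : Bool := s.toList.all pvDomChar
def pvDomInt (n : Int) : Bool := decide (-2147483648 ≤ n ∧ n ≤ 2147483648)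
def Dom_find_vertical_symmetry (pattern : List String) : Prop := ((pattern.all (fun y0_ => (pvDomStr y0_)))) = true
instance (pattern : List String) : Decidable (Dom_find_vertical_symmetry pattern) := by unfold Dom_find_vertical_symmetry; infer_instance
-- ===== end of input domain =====

-- B precomputes a pairwise column-difference table once and then decides each axis by
-- summing the table's antidiagonal; same results as A (objective: alternative structure,
-- not measured faster).

-- ===== PORT A =====
-- errors computed for one candidate x: the nested 'for xx' / 'for y' loops of A
def aInner (pattern : List String) (width height : Int) (x : Int) : Int :=
  -- l, r = x - xx, x + xx + 1 (inlined)
  (PySem.List.pyRange 0 width 1).foldl (fun errors xx =>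
    if 0 ≤ x - xx ∧ x - xx < x + xx + 1 ∧ x + xx + 1 < width then
      (PySem.List.pyRange 0 height 1).foldl (fun e y =>
        if PySem.Str.pyGet? (PySem.List.pyGetD pattern y "") (x - xx) ≠
           PySem.Str.pyGet? (PySem.List.pyGetD pattern y "") (x + xx + 1)
        then e + 1 else e) errors
    else errors) 0

-- the outer 'for x in range(width-1)' with its early return
def aLoop (pattern : List String) (width height : Int) : List Int → Int
  | [] => -1
  | x :: rest =>
    if aInner pattern width height x = 1 then x + 1 else aLoop pattern width height rest

def find_vertical_symmetry (pattern : List String) : Int :=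
  -- len(pattern[0]) raises IndexError on []; excluded by Pre_
  let width : Int := PySem.Str.len ((PySem.List.pyGet? pattern 0).getD "")
  let height : Int := (pattern.length : Int)
  aLoop pattern width height (PySem.List.pyRange 0 (width - 1) 1)

-- ===== PORT B =====
-- sum(row[l] != row[r] for row in pattern)
def bPairCount (pattern : List String) (l r : Int) : Int :=
  pattern.foldl (fun acc row =>
    acc + (if PySem.Str.pyGet? row l ≠ PySem.Str.pyGet? row r then 1 else 0)) 0

-- stage 1: the nested 'for l' / 'for r' loops filling diff[(l, r)]
def bBuild (pattern : List String) (width : Int) : PySem.Dict (Int × Int) Int :=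
  (PySem.List.pyRange 0 width 1).foldl (fun d l =>
    (PySem.List.pyRange (l + 1) width 1).foldl (fun d r =>
      d.insert (l, r) (bPairCount pattern l r)) d) PySem.Dict.empty

-- errors = sum(diff[(i-1-k, i+k)] for k in range(min(i, width-i)));
-- ported with getD: every key looked up was inserted in stage 1 (0 ≤ i-1-k < i+k < width)
def bAxisErrors (diff : PySem.Dict (Int × Int) Int) (width i : Int) : Int :=
  (PySem.List.pyRange 0 (min i (width - i)) 1).foldl
    (fun e k => e + diff.getD (i - 1 - k, i + k) 0) 0

-- stage 2: 'for i in range(1, width)' with its early return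
def bScan (diff : PySem.Dict (Int × Int) Int) (width : Int) : List Int → Int
  | [] => -1
  | i :: rest => if bAxisErrors diff width i = 1 then i else bScan diff width rest

def find_vertical_symmetry_alt (pattern : List String) : Int :=
  -- len(pattern[0]) raises IndexError on []; excluded by Pre_
  let width : Int := PySem.Str.len ((PySem.List.pyGet? pattern 0).getD "")
  let diff := bBuild pattern width
  bScan diff width (PySem.List.pyRange 1 width 1)

-- ===== PRECONDITION & SPEC =====
-- Pre_ excludes the empty pattern, on which A raises IndexError, and patterns whose first
-- row is at least 2 wide with some later row shorter than it, on which A raises IndexError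
-- except when an early smudge return happens to precede the out-of-range access (then B's
-- Python raises IndexError while building its table).
def Pre_find_vertical_symmetry (pattern : List String) : Prop :=
  pattern ≠ [] ∧ ((pattern.headD "").toList.length ≤ 1 ∨
    ∀ s ∈ pattern, (pattern.headD "").toList.length ≤ s.toList.length)

instance (pattern : List String) : Decidable (Pre_find_vertical_symmetry pattern) := by
  unfold Pre_find_vertical_symmetry; infer_instance

def pvWitness_find_vertical_symmetry : List String := ["#.#", "..#"]

def Spec_find_vertical_symmetry (pattern : List String) (out : Int) : Prop :=
  out = find_vertical_symmetry_alt pattern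
instance (pattern : List String) (out : Int) : Decidable (Spec_find_vertical_symmetry pattern out) := by
  unfold Spec_find_vertical_symmetry; infer_instance

-- ===== CLAIM (what is proved, stated in full; the proofs are below) =====
def Claim_equal_find_vertical_symmetry : Prop :=
  ∀ (pattern : List String), Dom_find_vertical_symmetry pattern →
    Pre_find_vertical_symmetry pattern →
    Spec_find_vertical_symmetry pattern (find_vertical_symmetry pattern)

-- ===== LEMMAS AND PROOFS =====

-- rows where columns l and r differ, as a count
def cntP (pattern : List String) (l r : Int) : Int :=
  (pattern.countP (fun s => decide (PySem.Str.pyGet? s l ≠ PySem.Str.pyGet? s r)) : Int)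

-- A's 'for y' loop counts the rows where columns l and r differ
lemma aInner_inner (pattern : List String) (l r : Int) (errors : Int) :
    (PySem.List.pyRange 0 (pattern.length : Int) 1).foldl (fun e y =>
      if PySem.Str.pyGet? (PySem.List.pyGetD pattern y "") l ≠
         PySem.Str.pyGet? (PySem.List.pyGetD pattern y "") r
      then e + 1 else e) errors
    = errors + cntP pattern l r := by
  rw [PySem.List.foldl_pyRange_zero_pyGetD' pattern ""
      (fun e s => if PySem.Str.pyGet? s l ≠ PySem.Str.pyGet? s r then e + 1 else e) errors]
  rw [PySem.List.foldl_ite_add_one]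
  rfl

-- A's 'for xx' loop is a guarded sum of per-pair counts
lemma aInner_eq (pattern : List String) (width x : Int) :
    aInner pattern width (pattern.length : Int) x
      = ((List.range width.toNat).map (fun xx : Nat =>
          if 0 ≤ x - xx ∧ x - xx < x + xx + 1 ∧ x + xx + 1 < width then
            cntP pattern (x - xx) (x + xx + 1)
          else 0)).sum := by
  unfold aInner
  have hbody : ∀ (acc : Int), ∀ xx ∈ PySem.List.pyRange 0 width 1,
      (if 0 ≤ x - xx ∧ x - xx < x + xx + 1 ∧ x + xx + 1 < width then
        (PySem.List.pyRange 0 (pattern.length : Int) 1).foldl (fun e y =>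
          if PySem.Str.pyGet? (PySem.List.pyGetD pattern y "") (x - xx) ≠
             PySem.Str.pyGet? (PySem.List.pyGetD pattern y "") (x + xx + 1)
          then e + 1 else e) acc
      else acc)
      = acc + (if 0 ≤ x - xx ∧ x - xx < x + xx + 1 ∧ x + xx + 1 < width then
          cntP pattern (x - xx) (x + xx + 1) else 0) := by
    intro acc xx _
    by_cases hc : 0 ≤ x - xx ∧ x - xx < x + xx + 1 ∧ x + xx + 1 < width
    · simp only [if_pos hc]
      exact aInner_inner pattern (x - xx) (x + xx + 1) acc
    · simp only [if_neg hc, add_zero]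
  rw [PySem.List.foldl_congr_mem (PySem.List.pyRange 0 width 1)
    (fun acc xx =>
      if 0 ≤ x - xx ∧ x - xx < x + xx + 1 ∧ x + xx + 1 < width then
        (PySem.List.pyRange 0 (pattern.length : Int) 1).foldl (fun e y =>
          if PySem.Str.pyGet? (PySem.List.pyGetD pattern y "") (x - xx) ≠
             PySem.Str.pyGet? (PySem.List.pyGetD pattern y "") (x + xx + 1)
          then e + 1 else e) acc
      else acc)
    (fun acc xx =>
      acc + (if 0 ≤ x - xx ∧ x - xx < x + xx + 1 ∧ x + xx + 1 < width then
        cntP pattern (x - xx) (x + xx + 1) else 0))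
    0 hbody]
  rw [PySem.List.foldl_add]
  rw [PySem.List.pyRange_one]
  rw [List.map_map]
  simp only [sub_zero, zero_add, Function.comp_def]

-- B's per-pair row sum is that same count
lemma bPairCount_eq (pattern : List String) (l r : Int) :
    bPairCount pattern l r = cntP pattern l r := by
  unfold bPairCount
  rw [PySem.List.foldl_add]
  have hsum : ∀ (ps : List String),
      (ps.map (fun row =>
        if PySem.Str.pyGet? row l ≠ PySem.Str.pyGet? row r then (1 : Int) else 0)).sum
      = cntP ps l r := by
    intro ps
    induction ps with
    | nil => simp [cntP]
    | cons p ps ih =>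
      simp only [List.map_cons, List.sum_cons, cntP, List.countP_cons] at ih ⊢
      by_cases hc : PySem.Str.pyGet? p l ≠ PySem.Str.pyGet? p r
      · rw [if_pos hc, decide_eq_true hc, ih]
        simp only [if_true]
        push_cast
        omega
      · rw [if_neg hc, decide_eq_false hc, ih]
        simp only [Bool.false_eq_true, if_neg (fun h => h)]
        push_cast
        omega
  rw [hsum]
  omega

-- the inner 'for r' loop of stage 1 seen through getD
lemma getD_innerFold (v : Int → Int → Int) (l : Int) (rs : List Int)
    (d : PySem.Dict (Int × Int) Int) (a b : Int) :
    ((rs.foldl (fun d r => d.insert (l, r) (v l r)) d).getD (a, b) 0)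
      = if a = l ∧ b ∈ rs then v a b else d.getD (a, b) 0 := by
  induction rs generalizing d with
  | nil => simp
  | cons r rs ih =>
    simp only [List.foldl_cons]
    rw [ih]
    rw [PySem.Dict.getD_insert]
    by_cases h1 : a = l ∧ b ∈ rs
    · rw [if_pos h1, if_pos ⟨h1.1, by simp [h1.2]⟩]
    · rw [if_neg h1]
      by_cases h2 : (a, b) = (l, r)
      · have ha : a = l := congrArg Prod.fst h2
        have hb : b = r := congrArg Prod.snd h2
        rw [if_pos h2, if_pos ⟨ha, by simp [hb]⟩, ha, hb]
      · rw [if_neg h2, if_neg]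
        intro ⟨hal, hbrs⟩
        rcases List.mem_cons.mp hbrs with hb | hb
        · exact h2 (by rw [hal, hb])
        · exact h1 ⟨hal, hb⟩

-- the outer 'for l' loop of stage 1 seen through getD
lemma getD_outerFold (v : Int → Int → Int) (width : Int) (ls : List Int)
    (d : PySem.Dict (Int × Int) Int) (a b : Int) :
    ((ls.foldl (fun d l =>
        (PySem.List.pyRange (l + 1) width 1).foldl
          (fun d r => d.insert (l, r) (v l r)) d) d).getD (a, b) 0)
      = if a ∈ ls ∧ b ∈ PySem.List.pyRange (a + 1) width 1 then v a b
        else d.getD (a, b) 0 := by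
  induction ls generalizing d with
  | nil => simp
  | cons l ls ih =>
    simp only [List.foldl_cons]
    rw [ih]
    rw [getD_innerFold]
    by_cases h1 : a ∈ ls ∧ b ∈ PySem.List.pyRange (a + 1) width 1
    · rw [if_pos h1, if_pos ⟨by simp [h1.1], h1.2⟩]
    · rw [if_neg h1]
      by_cases h2 : a = l ∧ b ∈ PySem.List.pyRange (l + 1) width 1
      · rw [if_pos h2, if_pos ⟨by simp [h2.1], by rw [h2.1]; exact h2.2⟩]
      · rw [if_neg h2, if_neg]
        intro ⟨hal, hb⟩
        rcases List.mem_cons.mp hal with ha | ha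
        · exact h2 ⟨ha, by rw [← ha]; exact hb⟩
        · exact h1 ⟨ha, hb⟩

-- stage 1's table read back: exactly the in-range pairs carry their count
lemma getD_bBuild (pattern : List String) (width a b : Int) :
    (bBuild pattern width).getD (a, b) 0
      = if 0 ≤ a ∧ a < width ∧ a < b ∧ b < width then cntP pattern a b else 0 := by
  unfold bBuild
  rw [getD_outerFold]
  rw [PySem.Dict.getD_empty]
  by_cases h : 0 ≤ a ∧ a < width ∧ a < b ∧ b < width
  · rw [if_pos h, if_pos]
    · exact bPairCount_eq pattern a b
    · exact ⟨PySem.List.mem_pyRange_one.mpr ⟨h.1, h.2.1⟩,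
        PySem.List.mem_pyRange_one.mpr ⟨by omega, h.2.2.2⟩⟩
  · rw [if_neg h, if_neg]
    intro ⟨ha, hb⟩
    have ha' := PySem.List.mem_pyRange_one.mp ha
    have hb' := PySem.List.mem_pyRange_one.mp hb
    exact h ⟨ha'.1, ha'.2, by omega, hb'.2⟩

-- a guarded sum over a long range is the plain sum over the guarded prefix
lemma sum_range_cut (f : Nat → Int) (M N : Nat) (h : M ≤ N) :
    ((List.range N).map (fun k => if k < M then f k else 0)).sum
      = ((List.range M).map f).sum := by
  induction N with
  | zero =>
    have : M = 0 := by omega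
    simp [this]
  | succ N ihN =>
    by_cases hM : M ≤ N
    · rw [List.range_succ, List.map_append, List.sum_append]
      rw [ihN hM]
      simp [Nat.not_lt.mpr hM]
    · have hMe : M = N + 1 := by omega
      subst hMe
      congr 1
      apply List.map_congr_left
      intro k hk
      rw [if_pos (List.mem_range.mp hk)]

-- B's axis sum equals A's per-axis error count
lemma axis_eq (pattern : List String) (width i : Int) (h1 : 1 ≤ i) (h2 : i < width) :
    bAxisErrors (bBuild pattern width) width i
      = aInner pattern width (pattern.length : Int) (i - 1) := by
  have hm1 : 1 ≤ min i (width - i) := by omega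
  unfold bAxisErrors
  rw [PySem.List.foldl_add]
  rw [PySem.List.pyRange_one]
  rw [List.map_map]
  rw [aInner_eq]
  have hA : ((List.range width.toNat).map (fun xx : Nat =>
      if 0 ≤ (i - 1) - xx ∧ (i - 1) - xx < (i - 1) + xx + 1 ∧ (i - 1) + xx + 1 < width then
        cntP pattern ((i - 1) - xx) ((i - 1) + xx + 1)
      else 0)).sum
    = ((List.range width.toNat).map (fun k : Nat =>
        if k < (min i (width - i)).toNat then cntP pattern (i - 1 - k) (i + k) else 0)).sum := by
    congr 1
    apply List.map_congr_left
    intro k _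
    by_cases hk : k < (min i (width - i)).toNat
    · rw [if_pos hk, if_pos (by exact ⟨by omega, by omega, by omega⟩)]
      congr 1
      omega
    · rw [if_neg hk, if_neg (by intro ⟨c1, c2, c3⟩; omega)]
  rw [hA]
  rw [sum_range_cut _ (min i (width - i)).toNat width.toNat (by omega)]
  simp only [sub_zero, zero_add, Function.comp_def]
  congr 1
  apply List.map_congr_left
  intro k hk
  have hkm : (k : Int) < min i (width - i) := by
    have := List.mem_range.mp hk
    omega
  rw [getD_bBuild]
  rw [if_pos (by exact ⟨by omega, by omega, by omega, by omega⟩)]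

-- A's outer loop and B's scan return the same once the per-axis tests agree
lemma loops_eq (pattern : List String) (width height : Int)
    (diff : PySem.Dict (Int × Int) Int) :
    ∀ xs : List Int,
      (∀ x ∈ xs, (aInner pattern width height x = 1 ↔ bAxisErrors diff width (x + 1) = 1)) →
      aLoop pattern width height xs = bScan diff width (xs.map (fun x => x + 1)) := by
  intro xs
  induction xs with
  | nil => intro _; rfl
  | cons x rest ih =>
    intro hall
    have hx := hall x (by simp)
    simp only [List.map_cons]
    rw [aLoop, bScan]
    by_cases hc : aInner pattern width height x = 1
    · rw [if_pos hc, if_pos (hx.mp hc)]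
    · rw [if_neg hc, if_neg (fun hb => hc (hx.mpr hb))]
      exact ih (fun y hy => hall y (by simp [hy]))

-- range reindexing: A's gaps x shifted by one are B's axes i
lemma range_shift (W : Int) :
    (PySem.List.pyRange 0 (W - 1) 1).map (fun x => x + 1)
      = PySem.List.pyRange 1 W 1 := by
  rw [PySem.List.pyRange_one, PySem.List.pyRange_one]
  rw [List.map_map]
  have hn : (W - 1 - 0).toNat = (W - 1).toNat := by omega
  simp only [sub_zero, Function.comp_def]
  apply List.map_congr_left
  intro k _
  omega

-- ===== VERDICT =====
theorem find_vertical_symmetry_spec : Claim_equal_find_vertical_symmetry := by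
  intro pattern _ hPre
  unfold Spec_find_vertical_symmetry
  simp only [find_vertical_symmetry, find_vertical_symmetry_alt]
  rw [← range_shift]
  apply loops_eq
  intro x hx
  have hxmem := PySem.List.mem_pyRange_one.mp hx
  rw [axis_eq pattern _ (x + 1) (by omega) (by omega)]
  have : x + 1 - 1 = x := by ring
  rw [this]
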